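-- pv_equiv track=rewrite | github.com/yonsei-K4/ONNX-nodes-merging | predict_req.py | extract_subgraph
-- ===== SOURCE A (Python) =====
-- from collections import defaultdict, deque
--
-- def extract_subgraph(graph, start, end):
--     subgraph = defaultdict(list)
--     visited = set()
--     stack = [start]
--
--     while stack:
--         node = stack.pop()
--         if node in visited:
--             continue
--         visited.add(node)
--
--         for nxt in graph[node]:
--             subgraph[node].append(nxt)
--             if nxt != end:
--                 stack.append(nxt)
--     return subgraph
-- ===== SOURCE B (Python) =====
-- from collections import defaultdict
--
-- def extract_subgraph(graph, start, end):
--     # Recursive DFS (children explored last-to-first, matching stack pop order);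
--     # each visited node's adjacency is copied wholesale instead of appended edge by edge.
--     subgraph = defaultdict(list)
--     visited = set()
--
--     def dfs(node):
--         if node in visited:
--             return
--         visited.add(node)
--         nbrs = graph[node]
--         if nbrs:
--             subgraph[node] = list(nbrs)
--         for nxt in reversed(nbrs):
--             if nxt != end:
--                 dfs(nxt)
--
--     dfs(start)
--     return subgraph
-- ===== Notes on version B (the rewrite author's own statement) =====
-- stated objective: alternative
-- what changed: The explicit-stack worklist DFS (pop, skip-if-visited, append each edge to the defaultdict, push unvisited work) is replaced by a recursive DFS whose inner dfs() visits children last-to-first and installs each visited node's adjacency list wholesale with one dict assignment; same visit order and result, different control structure.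
import Mathlib
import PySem

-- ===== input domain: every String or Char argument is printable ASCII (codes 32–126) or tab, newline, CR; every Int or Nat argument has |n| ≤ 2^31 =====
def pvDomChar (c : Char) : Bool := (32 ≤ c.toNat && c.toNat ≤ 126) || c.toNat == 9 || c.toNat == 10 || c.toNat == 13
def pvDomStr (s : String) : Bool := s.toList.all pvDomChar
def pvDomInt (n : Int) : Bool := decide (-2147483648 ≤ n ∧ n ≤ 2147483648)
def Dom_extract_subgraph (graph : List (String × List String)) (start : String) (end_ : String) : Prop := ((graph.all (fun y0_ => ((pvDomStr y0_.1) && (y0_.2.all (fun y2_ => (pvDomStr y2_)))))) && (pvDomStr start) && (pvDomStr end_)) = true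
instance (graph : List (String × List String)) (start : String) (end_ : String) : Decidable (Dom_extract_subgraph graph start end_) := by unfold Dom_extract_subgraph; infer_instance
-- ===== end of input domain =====

-- B rewrites the explicit-stack DFS as a recursive DFS (children explored last-to-first,
-- which is the stack's pop order) that copies each visited node's adjacency wholesale
-- instead of appending it edge by edge; same cost, different decomposition.

-- ===== PORT A =====

-- graph[node]: first-match association-list lookup (a Python dict has unique keys, so
-- first match is exact); Python raises KeyError on a missing key — excluded by Pre_.
def pvAdj (graph : List (String × List String)) (node : String) : List String :=
  match graph with
  | [] => []
  | p :: rest => if p.1 == node then p.2 else pvAdj rest node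

-- subgraph[node].append(nxt) on a defaultdict(list): the key is created (at the end)
-- on first touch, afterwards the list grows in place — exact hand port.
def pvAppend (sg : List (String × List String)) (node : String) (nxt : String) :
    List (String × List String) :=
  match sg with
  | [] => [(node, [nxt])]
  | p :: rest => if p.1 == node then (p.1, p.2 ++ [nxt]) :: rest else p :: pvAppend rest node nxt

-- fuel: the loop pops one element per iteration and pushes at most (len of an unvisited
-- key's adjacency) per visit, so 1 + Σ (len+1) iterations always suffice (proved below).
def pvFuel (graph : List (String × List String)) : Nat :=
  1 + (graph.map (fun p => p.2.length + 1)).sum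

-- the while loop; the stack's top (Python's right end, where append/pop act) is the head.
def pvRunA (graph : List (String × List String)) (end_ : String) :
    Nat → List (String × List String) → PySem.Set String → List String →
    List (String × List String)
  | 0, sg, _, _ => sg
  | _ + 1, sg, _, [] => sg
  | f + 1, sg, vis, node :: stack =>
    if PySem.Set.contains vis node then pvRunA graph end_ f sg vis stack
    else
      let r := (pvAdj graph node).foldl
        (fun (p : List (String × List String) × List String) nxt =>
          (pvAppend p.1 node nxt, if nxt != end_ then nxt :: p.2 else p.2))
        (sg, stack)
      pvRunA graph end_ f r.1 (PySem.Set.add vis node) r.2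

def extract_subgraph (graph : List (String × List String)) (start : String) (end_ : String) : List (String × List String) :=
  pvRunA graph end_ (pvFuel graph) [] PySem.Set.empty [start]

-- ===== PORT B =====

-- subgraph[node] = list(nbrs): dict item assignment — exact hand port (a fresh key is
-- appended at the end, an existing one is overwritten in place).
def pvSetItem (sg : List (String × List String)) (node : String) (nbrs : List String) :
    List (String × List String) :=
  match sg with
  | [] => [(node, nbrs)]
  | p :: rest => if p.1 == node then (node, nbrs) :: rest else p :: pvSetItem rest node nbrs

-- dfs(node) of Source B; the state is (subgraph, visited); fuel: each nested call either
-- returns at once or marks a new node visited, so pvFuel bounds the depth (proved below).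
mutual
def pvDfsB (graph : List (String × List String)) (end_ : String) :
    Nat → List (String × List String) × PySem.Set String → String →
    List (String × List String) × PySem.Set String
  | 0, s, _ => s
  | f + 1, s, node =>
    if PySem.Set.contains s.2 node then s
    else
      let vis := PySem.Set.add s.2 node
      let nbrs := pvAdj graph node
      let sg := if nbrs.isEmpty then s.1 else pvSetItem s.1 node nbrs
      pvDfsList graph end_ f (sg, vis) nbrs.reverse
termination_by f _ _ => (f, 0)

-- the 'for nxt in reversed(nbrs): if nxt != end: dfs(nxt)' loop
def pvDfsList (graph : List (String × List String)) (end_ : String) :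
    Nat → List (String × List String) × PySem.Set String → List String →
    List (String × List String) × PySem.Set String
  | _, s, [] => s
  | f, s, nxt :: rest =>
    pvDfsList graph end_ f (if nxt != end_ then pvDfsB graph end_ f s nxt else s) rest
termination_by f _ l => (f, l.length + 1)
end

def extract_subgraph_alt (graph : List (String × List String)) (start : String) (end_ : String) : List (String × List String) :=
  (pvDfsB graph end_ (pvFuel graph) ([], PySem.Set.empty) start).1

-- ===== PRECONDITION & SPEC =====

-- the set of nodes the traversal looks up: start plus every node reachable from start
-- along neighbour edges that never pass through end_; one closure step expands the
-- neighbours of every current member (a missing key contributes nothing), and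
-- graph.length + 1 rounds saturate, since the interior of a shortest path consists of
-- distinct keys of graph.
def pvReach (graph : List (String × List String)) (start : String) (end_ : String) : List String :=
  (fun S => S.foldl (fun acc n =>
      (pvAdj graph n).foldl (fun acc2 v =>
        if v != end_ && !acc2.contains v then acc2 ++ [v] else acc2) acc) S)^[graph.length + 1]
    [start]

-- A raises KeyError exactly when it looks up a node absent from graph, i.e. when some
-- node of the reachability closure pvReach is not a key; Pre_ excludes exactly those
-- inputs, plus duplicate-key association lists, which a Python dict cannot carry.
def Pre_extract_subgraph (graph : List (String × List String)) (start : String) (end_ : String) : Prop :=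
  (graph.map Prod.fst).Nodup ∧ ∀ v ∈ pvReach graph start end_, v ∈ graph.map Prod.fst
instance (graph : List (String × List String)) (start : String) (end_ : String) : Decidable (Pre_extract_subgraph graph start end_) := by unfold Pre_extract_subgraph; infer_instance

def pvWitness_extract_subgraph : (List (String × List String)) × String × String :=
  ([("a", ["b", "c"]), ("b", []), ("c", ["a"])], "a", "c")

def Spec_extract_subgraph (graph : List (String × List String)) (start : String) (end_ : String) (out : List (String × List String)) : Prop := out = extract_subgraph_alt graph start end_
instance (graph : List (String × List String)) (start : String) (end_ : String) (out : List (String × List String)) : Decidable (Spec_extract_subgraph graph start end_ out) := by unfold Spec_extract_subgraph; infer_instance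

-- ===== CLAIM (what is proved, stated in full; the proofs are below) =====
def Claim_equal_extract_subgraph : Prop := ∀ (graph : List (String × List String)) (start : String) (end_ : String), Dom_extract_subgraph graph start end_ → Pre_extract_subgraph graph start end_ → Spec_extract_subgraph graph start end_ (extract_subgraph graph start end_)

-- ===== LEMMAS AND PROOFS =====

-- the witness satisfies Dom and Pre
theorem pvWitness_ok :
    Dom_extract_subgraph pvWitness_extract_subgraph.1 pvWitness_extract_subgraph.2.1
      pvWitness_extract_subgraph.2.2 ∧
    Pre_extract_subgraph pvWitness_extract_subgraph.1 pvWitness_extract_subgraph.2.1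
      pvWitness_extract_subgraph.2.2 := by
  constructor
  · decide
  · constructor
    · decide
    · decide

-- pair-valued version of A's loop (the port returns only the subgraph)
def pvRunAP (graph : List (String × List String)) (end_ : String) :
    Nat → List (String × List String) × PySem.Set String → List String →
    List (String × List String) × PySem.Set String
  | 0, s, _ => s
  | _ + 1, s, [] => s
  | f + 1, s, node :: stack =>
    if PySem.Set.contains s.2 node then pvRunAP graph end_ f s stack
    else
      let r := (pvAdj graph node).foldl
        (fun (p : List (String × List String) × List String) nxt =>
          (pvAppend p.1 node nxt, if nxt != end_ then nxt :: p.2 else p.2))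
        (s.1, stack)
      pvRunAP graph end_ f (r.1, PySem.Set.add s.2 node) r.2

theorem pvRunA_eq_fst (graph : List (String × List String)) (end_ : String) :
    ∀ f sg vis stack, pvRunA graph end_ f sg vis stack = (pvRunAP graph end_ f (sg, vis) stack).1 := by
  intro f
  induction f with
  | zero => intro sg vis stack; rfl
  | succ f ih =>
    intro sg vis stack
    cases stack with
    | nil => rfl
    | cons node rest =>
      cases hb : PySem.Set.contains vis node with
      | true =>
        simp only [pvRunA, pvRunAP, hb, if_true]
        rw [ih]
      | false =>
        simp only [pvRunA, pvRunAP, hb, Bool.false_eq_true, if_false]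
        rw [ih]

-- potential: total weight of entries whose key is not yet visited
def pvS (graph : List (String × List String)) (vis : PySem.Set String) : Nat :=
  ((graph.filter (fun p => !(PySem.Set.contains vis p.1))).map (fun p => p.2.length + 1)).sum

theorem pvS_empty (graph : List (String × List String)) :
    pvS graph PySem.Set.empty = (graph.map (fun p => p.2.length + 1)).sum := by
  unfold pvS
  simp [PySem.Set.contains, PySem.Set.empty]

theorem pvS_antitone (graph : List (String × List String)) (vis vis' : PySem.Set String)
    (h : ∀ x, PySem.Set.contains vis x → PySem.Set.contains vis' x) :
    pvS graph vis' ≤ pvS graph vis := by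
  induction graph with
  | nil => simp [pvS]
  | cons p rest ih =>
    unfold pvS at ih ⊢
    simp only [List.filter_cons]
    cases h1 : PySem.Set.contains vis' p.1 with
    | true =>
      cases h3 : PySem.Set.contains vis p.1 with
      | true => simpa [h1, h3] using ih
      | false =>
        simp only [h1, h3, Bool.not_true, Bool.not_false, Bool.false_eq_true, if_false, if_true,
          List.map_cons, List.sum_cons]
        omega
    | false =>
      have h3 : PySem.Set.contains vis p.1 = false := by
        cases hv : PySem.Set.contains vis p.1 with
        | true => rw [h _ hv] at h1; exact absurd h1 (by simp)
        | false => rfl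
      simp only [h1, h3, Bool.not_false, if_true, List.map_cons, List.sum_cons]
      omega

theorem pvContains_add (vis : PySem.Set String) (node x : String) :
    PySem.Set.contains (PySem.Set.add vis node) x = (PySem.Set.contains vis x || x == node) := by
  unfold PySem.Set.add
  cases h : PySem.Set.contains vis node with
  | true =>
    simp only [h, if_true]
    cases hx : (x == node) with
    | true =>
      have : x = node := by simpa using hx
      subst this
      rw [Bool.or_true]
      exact h
    | false => simp
  | false =>
    simp only [h, Bool.false_eq_true, if_false]
    simp only [PySem.Set.contains, List.contains_append, List.contains_cons]
    simp

-- pvS splits off the weight of node's entries when node is newly visited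
theorem pvS_split (graph : List (String × List String)) (vis : PySem.Set String) (node : String)
    (h : PySem.Set.contains vis node = false) :
    pvS graph vis =
      pvS graph (PySem.Set.add vis node) +
        ((graph.filter (fun p => p.1 == node)).map (fun p => p.2.length + 1)).sum := by
  induction graph with
  | nil => simp [pvS]
  | cons p rest ih =>
    unfold pvS at ih ⊢
    simp only [List.filter_cons]
    cases h1 : (p.1 == node) with
    | true =>
      have hpn : p.1 = node := by simpa using h1
      have hc : PySem.Set.contains vis p.1 = false := by rw [hpn]; exact h
      have hc2 : PySem.Set.contains (PySem.Set.add vis node) p.1 = true := by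
        rw [pvContains_add, hpn]
        simp
      simp only [hc, hc2, h1, Bool.not_true, Bool.not_false, Bool.false_eq_true, if_false,
        eq_self_iff_true, if_true, List.map_cons, List.sum_cons]
      omega
    | false =>
      have hc2 : PySem.Set.contains (PySem.Set.add vis node) p.1 = PySem.Set.contains vis p.1 := by
        rw [pvContains_add, h1, Bool.or_false]
      cases hc : PySem.Set.contains vis p.1 with
      | true =>
        simp only [hc, hc2.trans hc, h1, Bool.not_true, Bool.false_eq_true, if_false]
        exact ih
      | false =>
        simp only [hc, hc2.trans hc, h1, Bool.not_false, Bool.false_eq_true, if_false,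
          eq_self_iff_true, if_true, List.map_cons, List.sum_cons]
        omega

theorem pvT_ge (graph : List (String × List String)) (node : String)
    (h : node ∈ graph.map Prod.fst) :
    (pvAdj graph node).length + 1 ≤
      ((graph.filter (fun p => p.1 == node)).map (fun p => p.2.length + 1)).sum := by
  induction graph with
  | nil => simp at h
  | cons p rest ih =>
    cases h1 : (p.1 == node) with
    | true =>
      simp only [pvAdj, List.filter_cons, h1, eq_self_iff_true, if_true, List.map_cons,
        List.sum_cons]
      omega
    | false =>
      have hne : p.1 ≠ node := by simpa using h1
      have hmem : node ∈ rest.map Prod.fst := by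
        simp only [List.map_cons, List.mem_cons] at h
        rcases h with h | h
        · exact absurd h.symm hne
        · exact h
      simp only [pvAdj, List.filter_cons, h1, Bool.false_eq_true, if_false]
      exact ih hmem

theorem pvAdj_ne_nil_mem (graph : List (String × List String)) (node : String)
    (h : pvAdj graph node ≠ []) : node ∈ graph.map Prod.fst := by
  induction graph with
  | nil => simp [pvAdj] at h
  | cons p rest ih =>
    cases h1 : (p.1 == node) with
    | true =>
      have : p.1 = node := by simpa using h1
      simp [this]
    | false =>
      simp only [pvAdj, h1, Bool.false_eq_true, if_false] at h
      simp [ih h]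

-- strict potential drop at a newly visited node with nonempty adjacency
theorem pvS_drop (graph : List (String × List String)) (vis : PySem.Set String) (node : String)
    (h : PySem.Set.contains vis node = false) (hne : pvAdj graph node ≠ []) :
    pvS graph (PySem.Set.add vis node) + (pvAdj graph node).length + 1 ≤ pvS graph vis := by
  have h1 := pvS_split graph vis node h
  have h2 := pvT_ge graph node (pvAdj_ne_nil_mem graph node hne)
  omega

-- drop by at least one entry weight for any newly visited key
theorem pvS_drop_one (graph : List (String × List String)) (vis : PySem.Set String) (node : String)
    (h : PySem.Set.contains vis node = false) :
    pvS graph (PySem.Set.add vis node) ≤ pvS graph vis := by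
  have h1 := pvS_split graph vis node h
  omega

-- appending to a key absent from sg
theorem pvAppend_fresh (sg : List (String × List String)) (node nxt : String)
    (h : ∀ p ∈ sg, (p.1 == node) = false) :
    pvAppend sg node nxt = sg ++ [(node, [nxt])] := by
  induction sg with
  | nil => simp [pvAppend]
  | cons p rest ih =>
    have hp := h p (by simp)
    simp only [pvAppend, hp]
    simp [ih (fun q hq => h q (by simp [hq]))]

theorem pvAppend_last (sg : List (String × List String)) (node nxt : String) (l : List String)
    (h : ∀ p ∈ sg, (p.1 == node) = false) :
    pvAppend (sg ++ [(node, l)]) node nxt = sg ++ [(node, l ++ [nxt])] := by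
  induction sg with
  | nil => simp [pvAppend]
  | cons p rest ih =>
    have hp := h p (by simp)
    simp only [List.cons_append, pvAppend, hp]
    simp [ih (fun q hq => h q (by simp [hq]))]

theorem pvSetItem_fresh (sg : List (String × List String)) (node : String) (nbrs : List String)
    (h : ∀ p ∈ sg, (p.1 == node) = false) :
    pvSetItem sg node nbrs = sg ++ [(node, nbrs)] := by
  induction sg with
  | nil => simp [pvSetItem]
  | cons p rest ih =>
    have hp := h p (by simp)
    simp only [pvSetItem, hp]
    simp [ih (fun q hq => h q (by simp [hq]))]

-- the inner for-loop of A, once node's entry exists at the end of sg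
theorem pvFoldA_aux (end_ node : String) (sg : List (String × List String))
    (h : ∀ p ∈ sg, (p.1 == node) = false) :
    ∀ (nbrs l st : List String),
      nbrs.foldl
        (fun (p : List (String × List String) × List String) nxt =>
          (pvAppend p.1 node nxt, if nxt != end_ then nxt :: p.2 else p.2))
        (sg ++ [(node, l)], st)
      = (sg ++ [(node, l ++ nbrs)], (nbrs.filter (fun x => x != end_)).reverse ++ st) := by
  intro nbrs
  induction nbrs with
  | nil => intro l st; simp
  | cons n ns ih =>
    intro l st
    simp only [List.foldl_cons]
    rw [pvAppend_last sg node n l h]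
    rw [ih (l ++ [n]) (if n != end_ then n :: st else st)]
    cases hn : (n != end_) with
    | true =>
      simp only [List.filter_cons, hn]
      simp
    | false =>
      simp only [List.filter_cons, hn]
      simp

-- the inner for-loop of A from a fresh state
theorem pvFoldA (end_ node : String) (sg : List (String × List String)) (st : List String)
    (nbrs : List String) (h : ∀ p ∈ sg, (p.1 == node) = false) :
    nbrs.foldl
      (fun (p : List (String × List String) × List String) nxt =>
        (pvAppend p.1 node nxt, if nxt != end_ then nxt :: p.2 else p.2))
      (sg, st)
    = ((if nbrs.isEmpty then sg else sg ++ [(node, nbrs)]),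
        (nbrs.filter (fun x => x != end_)).reverse ++ st) := by
  cases nbrs with
  | nil => simp
  | cons n ns =>
    simp only [List.foldl_cons, List.isEmpty_cons]
    rw [pvAppend_fresh sg node n h]
    rw [pvFoldA_aux end_ node sg h ns [n] (if n != end_ then n :: st else st)]
    cases hn : (n != end_) with
    | true =>
      simp only [List.filter_cons, hn]
      simp
    | false =>
      simp only [List.filter_cons, hn]
      simp

-- visited only grows under B's dfs
theorem pvDfsB_mono (graph : List (String × List String)) (end_ : String) :
    ∀ f s n x, PySem.Set.contains s.2 x = true →
      PySem.Set.contains (pvDfsB graph end_ f s n).2 x = true := by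
  intro f
  induction f with
  | zero => intro s n x h; simpa only [pvDfsB] using h
  | succ f ih =>
    have ihl : ∀ (l : List String) s x, PySem.Set.contains s.2 x = true →
        PySem.Set.contains (pvDfsList graph end_ f s l).2 x = true := by
      intro l
      induction l with
      | nil => intro s x h; simpa only [pvDfsList] using h
      | cons n ns ihl2 =>
        intro s x h
        simp only [pvDfsList]
        cases hn : (n != end_) with
        | true =>
          simp only [if_true]
          exact ihl2 _ _ (ih s n x h)
        | false =>
          simp only [Bool.false_eq_true, if_false]
          exact ihl2 _ _ h
    intro s n x h
    simp only [pvDfsB]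
    cases hc : PySem.Set.contains s.2 n with
    | true =>
      simp only [if_true]
      exact h
    | false =>
      simp only [Bool.false_eq_true, if_false]
      apply ihl
      show PySem.Set.contains (PySem.Set.add s.2 n) x = true
      rw [pvContains_add, h, Bool.true_or]

theorem pvDfsList_mono (graph : List (String × List String)) (end_ : String) :
    ∀ (l : List String) f s x, PySem.Set.contains s.2 x = true →
      PySem.Set.contains (pvDfsList graph end_ f s l).2 x = true := by
  intro l
  induction l with
  | nil => intro f s x h; simpa only [pvDfsList] using h
  | cons n ns ihl =>
    intro f s x h
    simp only [pvDfsList]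
    cases hn : (n != end_) with
    | true =>
      simp only [if_true]
      exact ihl _ _ _ (pvDfsB_mono graph end_ f s n x h)
    | false =>
      simp only [Bool.false_eq_true, if_false]
      exact ihl _ _ _ h

-- fuel irrelevance for B's dfs once the fuel exceeds the potential
theorem pvDfsB_irrel (graph : List (String × List String)) (end_ : String) :
    ∀ k f g s n, pvS graph s.2 ≤ k → pvS graph s.2 + 1 ≤ f → pvS graph s.2 + 1 ≤ g →
      pvDfsB graph end_ f s n = pvDfsB graph end_ g s n := by
  intro k
  induction k with
  | zero =>
    intro f g s n hk hf hg
    obtain ⟨f', rfl⟩ : ∃ f', f = f' + 1 := ⟨f - 1, by omega⟩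
    obtain ⟨g', rfl⟩ : ∃ g', g = g' + 1 := ⟨g - 1, by omega⟩
    simp only [pvDfsB]
    cases hc : PySem.Set.contains s.2 n with
    | true => simp only [if_true]
    | false =>
      have hnil : pvAdj graph n = [] := by
        by_contra hne
        have := pvS_drop graph s.2 n hc hne
        omega
      simp only [Bool.false_eq_true, if_false]
      rw [hnil]
      simp only [List.reverse_nil, pvDfsList]
  | succ k ih =>
    intro f g s n hk hf hg
    obtain ⟨f', rfl⟩ : ∃ f', f = f' + 1 := ⟨f - 1, by omega⟩
    obtain ⟨g', rfl⟩ : ∃ g', g = g' + 1 := ⟨g - 1, by omega⟩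
    simp only [pvDfsB]
    cases hc : PySem.Set.contains s.2 n with
    | true => simp only [if_true]
    | false =>
      simp only [Bool.false_eq_true, if_false]
      cases hnil : pvAdj graph n with
      | nil => simp only [List.isEmpty_nil, if_true, List.reverse_nil, pvDfsList]
      | cons a as =>
        have hdrop := pvS_drop graph s.2 n hc (by rw [hnil]; simp)
        rw [hnil] at hdrop
        have hlist : ∀ (l : List String) (t : List (String × List String) × PySem.Set String),
            pvS graph t.2 ≤ k → pvS graph t.2 + 1 ≤ f' → pvS graph t.2 + 1 ≤ g' →
            pvDfsList graph end_ f' t l = pvDfsList graph end_ g' t l := by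
          intro l
          induction l with
          | nil => intro t _ _ _; simp only [pvDfsList]
          | cons m ms ihl =>
            intro t ht htf htg
            simp only [pvDfsList]
            cases hm : (m != end_) with
            | true =>
              simp only [if_true]
              rw [ih f' g' t m ht htf htg]
              have hmono : pvS graph (pvDfsB graph end_ g' t m).2 ≤ pvS graph t.2 :=
                pvS_antitone graph t.2 _ (fun x hx => pvDfsB_mono graph end_ g' t m x hx)
              exact ihl _ (by omega) (by omega) (by omega)
            | false =>
              simp only [Bool.false_eq_true, if_false]
              exact ihl t ht htf htg
        apply hlist
        · show pvS graph (PySem.Set.add s.2 n) ≤ k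
          omega
        · show pvS graph (PySem.Set.add s.2 n) + 1 ≤ f'
          omega
        · show pvS graph (PySem.Set.add s.2 n) + 1 ≤ g'
          omega

-- B's guarded loop is a fold over the filtered list
theorem pvDfsList_eq_fold (graph : List (String × List String)) (end_ : String) :
    ∀ (l : List String) f s,
      pvDfsList graph end_ f s l =
        (l.filter (fun x => x != end_)).foldl (fun t n => pvDfsB graph end_ f t n) s := by
  intro l
  induction l with
  | nil => intro f s; simp only [pvDfsList, List.filter_nil, List.foldl_nil]
  | cons n ns ih =>
    intro f s
    simp only [pvDfsList]
    cases hn : (n != end_) with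
    | true =>
      simp only [List.filter_cons, hn, if_true, List.foldl_cons]
      exact ih _ _
    | false =>
      simp only [List.filter_cons, hn, Bool.false_eq_true, if_false]
      exact ih _ _

theorem pvFold_irrel (graph : List (String × List String)) (end_ : String) :
    ∀ (l : List String) s f g, pvS graph s.2 + 1 ≤ f → pvS graph s.2 + 1 ≤ g →
      l.foldl (fun t n => pvDfsB graph end_ f t n) s
        = l.foldl (fun t n => pvDfsB graph end_ g t n) s := by
  intro l
  induction l with
  | nil => intro s f g _ _; rfl
  | cons n ns ih =>
    intro s f g hf hg
    simp only [List.foldl_cons]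
    rw [pvDfsB_irrel graph end_ (pvS graph s.2) f g s n le_rfl hf hg]
    have hmono : pvS graph (pvDfsB graph end_ g s n).2 ≤ pvS graph s.2 :=
      pvS_antitone graph s.2 _ (fun x hx => pvDfsB_mono graph end_ g s n x hx)
    exact ih _ f g (by omega) (by omega)

-- main invariant: A's loop over any stack is the fold of B's dfs over that stack
theorem pvMain (graph : List (String × List String)) (end_ : String) :
    ∀ fA (s : List (String × List String) × PySem.Set String) (stack : List String) fB,
      stack.length + pvS graph s.2 ≤ fA → pvS graph s.2 + 1 ≤ fB →
      (∀ p ∈ s.1, PySem.Set.contains s.2 p.1 = true) →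
      pvRunAP graph end_ fA s stack
        = stack.foldl (fun t n => pvDfsB graph end_ fB t n) s := by
  intro fA
  induction fA with
  | zero =>
    intro s stack fB hA hB hInv
    cases stack with
    | nil => rfl
    | cons a b => simp at hA
  | succ fA ih =>
    intro s stack fB hA hB hInv
    cases stack with
    | nil => rfl
    | cons node rest =>
      obtain ⟨g, rfl⟩ : ∃ g, fB = g + 1 := ⟨fB - 1, by omega⟩
      obtain ⟨sg, vis⟩ := s
      simp only at hA hB hInv
      have hA' : rest.length + 1 + pvS graph vis ≤ fA + 1 := by
        simpa using hA
      rw [List.foldl_cons]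
      by_cases hc : PySem.Set.contains vis node = true
      · -- already visited: A skips the node, B's dfs returns the state unchanged
        have hstep : pvDfsB graph end_ (g + 1) (sg, vis) node = (sg, vis) := by
          simp only [pvDfsB]
          rw [if_pos hc]
        have hlhs : pvRunAP graph end_ (fA + 1) (sg, vis) (node :: rest)
            = pvRunAP graph end_ fA (sg, vis) rest := by
          simp only [pvRunAP]
          rw [if_pos hc]
        rw [hstep, hlhs]
        exact ih (sg, vis) rest (g + 1) (by show rest.length + pvS graph vis ≤ fA; omega) hB hInv
      · have hcf : PySem.Set.contains vis node = false := by
          cases hx : PySem.Set.contains vis node with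
          | true => exact absurd hx hc
          | false => rfl
        have hfresh : ∀ p ∈ sg, (p.1 == node) = false := by
          intro p hp
          cases hb : (p.1 == node) with
          | false => rfl
          | true =>
            have hpn : p.1 = node := by simpa using hb
            have := hInv p hp
            rw [hpn, hcf] at this
            exact absurd this (by simp)
        have hnodein : PySem.Set.contains (PySem.Set.add vis node) node = true := by
          rw [pvContains_add]
          simp
        have hcontain1 : ∀ x, PySem.Set.contains vis x = true →
            PySem.Set.contains (PySem.Set.add vis node) x = true := by
          intro x hx
          rw [pvContains_add, hx, Bool.true_or]
        have hlhs : pvRunAP graph end_ (fA + 1) (sg, vis) (node :: rest)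
            = pvRunAP graph end_ fA
                ((if (pvAdj graph node).isEmpty then sg else sg ++ [(node, pvAdj graph node)]),
                  PySem.Set.add vis node)
                (((pvAdj graph node).filter (fun x => x != end_)).reverse ++ rest) := by
          simp only [pvRunAP]
          rw [if_neg hc]
          rw [pvFoldA end_ node sg rest (pvAdj graph node) hfresh]
        rw [hlhs]
        cases hnbrs : pvAdj graph node with
        | nil =>
          -- empty adjacency: nothing appended, nothing pushed, nothing recursed
          have hS1 : pvS graph (PySem.Set.add vis node) ≤ pvS graph vis :=
            pvS_drop_one graph vis node hcf
          have hstep : pvDfsB graph end_ (g + 1) (sg, vis) node = (sg, PySem.Set.add vis node) := by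
            simp only [pvDfsB]
            rw [if_neg hc, hnbrs]
            simp only [List.isEmpty_nil, if_true, List.reverse_nil, pvDfsList]
          rw [hstep]
          simp only [List.isEmpty_nil, if_true, List.filter_nil, List.reverse_nil,
            List.nil_append]
          exact ih (sg, PySem.Set.add vis node) rest (g + 1)
            (by show rest.length + pvS graph (PySem.Set.add vis node) ≤ fA; omega)
            (by show pvS graph (PySem.Set.add vis node) + 1 ≤ g + 1; omega)
            (fun p hp => hcontain1 _ (hInv p hp))
        | cons a as =>
          have hdrop := pvS_drop graph vis node hcf (by rw [hnbrs]; simp)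
          rw [hnbrs] at hdrop
          have hlen : (a :: as).length = as.length + 1 := by simp
          rw [hlen] at hdrop
          have hne : ((a :: as : List String).isEmpty) = false := by simp
          rw [hne]
          simp only [Bool.false_eq_true, if_false]
          set nbrs : List String := a :: as with hn0
          set vis1 := PySem.Set.add vis node with hv1
          set sg1 := sg ++ [(node, nbrs)] with hsg1
          have hInv1 : ∀ p ∈ sg1, PySem.Set.contains vis1 p.1 = true := by
            intro p hp
            rw [hsg1, List.mem_append, List.mem_singleton] at hp
            rcases hp with hp | hp
            · exact hcontain1 _ (hInv p hp)
            · rw [hp]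
              exact hnodein
          have hlenf : (nbrs.filter (fun x => x != end_)).length ≤ nbrs.length :=
            List.length_filter_le _ nbrs
          have hlen1 : nbrs.length = as.length + 1 := by rw [hn0]; simp
          have hstep : pvDfsB graph end_ (g + 1) (sg, vis) node
              = pvDfsList graph end_ g (sg1, vis1) nbrs.reverse := by
            simp only [pvDfsB]
            rw [if_neg hc]
            rw [show pvAdj graph node = nbrs from hnbrs]
            rw [show (nbrs.isEmpty) = false from by rw [hn0]; simp]
            simp only [Bool.false_eq_true, if_false]
            rw [pvSetItem_fresh sg node nbrs hfresh]
          rw [hstep]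
          rw [ih (sg1, vis1) ((nbrs.filter (fun x => x != end_)).reverse ++ rest) g
            (by show ((nbrs.filter (fun x => x != end_)).reverse ++ rest).length + pvS graph vis1 ≤ fA;
                simp only [List.length_append, List.length_reverse]; omega)
            (by show pvS graph vis1 + 1 ≤ g; omega) hInv1]
          rw [List.foldl_append]
          have hinner : (nbrs.filter (fun x => x != end_)).reverse.foldl
                (fun t n => pvDfsB graph end_ g t n) (sg1, vis1)
              = pvDfsList graph end_ g (sg1, vis1) nbrs.reverse := by
            rw [pvDfsList_eq_fold, List.filter_reverse]
          rw [hinner]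
          set mid := pvDfsList graph end_ g (sg1, vis1) nbrs.reverse with hmid
          have hmidS : pvS graph mid.2 ≤ pvS graph vis1 :=
            pvS_antitone graph vis1 _
              (fun x hx => pvDfsList_mono graph end_ nbrs.reverse g (sg1, vis1) x hx)
          exact pvFold_irrel graph end_ rest mid g (g + 1) (by omega) (by omega)

-- ===== VERDICT (by name: the statement is the Claim_ definition above) =====
theorem extract_subgraph_spec : Claim_equal_extract_subgraph := by
  intro graph start end_ hdom hpre
  unfold Spec_extract_subgraph extract_subgraph extract_subgraph_alt
  rw [pvRunA_eq_fst]
  have hS : pvS graph PySem.Set.empty = (graph.map (fun p => p.2.length + 1)).sum :=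
    pvS_empty graph
  have hb1 : ([start] : List String).length + pvS graph PySem.Set.empty ≤ pvFuel graph := by
    rw [hS]
    unfold pvFuel
    simp
  have hb2 : pvS graph PySem.Set.empty + 1 ≤ pvFuel graph := by
    rw [hS]
    unfold pvFuel
    omega
  have h := pvMain graph end_ (pvFuel graph) ([], PySem.Set.empty) [start] (pvFuel graph)
      hb1 hb2 (by intro p hp; simp at hp)
  rw [h]
  rfl
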